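-- pv_equiv track=rewrite | github.com/yarm872/Parser_crypto-exchanges-BEST-version | parse_crypto_exchangers_proj_4_v2_final.py | get_message_to_bot
-- ===== SOURCE A (Python) =====
-- from collections import defaultdict
--
-- def get_message_to_bot(element):
--     messege=""
--     for key1, value1 in element.items():
--         mylist=value1.values()
--
--         D = defaultdict(list)
--         for i,item in enumerate(mylist):
--             D[item].append(i)
--         D = {k:v for k,v in D.items() if len(v)>1}
--
--         for i in D.keys():
--             if i!=-1:
--                 for key, value in element.items():
--                     for key2, value2 in value.items():
--                         if value2==i:
--                             messege+=str(key2)+" "+ str(value2) +"\n"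
--         messege="ПО ССЫЛКЕ- "+str(key1)+" СЛЕДУЮЩИЕ ПОВТОРЫ:\n"+messege
--     return messege
-- ===== SOURCE B (Python) =====
-- def get_message_to_bot(element):
--     # one pass: value -> concatenated "key value\n" lines over all inner dicts
--     index = {}
--     for value in element.values():
--         for key2, value2 in value.items():
--             index[value2] = index.get(value2, "") + str(key2) + " " + str(value2) + "\n"
--     heads = ""
--     body = ""
--     for key1, value1 in element.items():
--         vals = list(value1.values())
--         counts = {}
--         for v in vals:
--             counts[v] = counts.get(v, 0) + 1
--         for v in dict.fromkeys(vals):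
--             if counts[v] > 1 and v != -1:
--                 body += index.get(v, "")
--         heads = "ПО ССЫЛКЕ- " + str(key1) + " СЛЕДУЮЩИЕ ПОВТОРЫ:\n" + heads
--     return heads + body
-- ===== Notes on version B (the rewrite author's own statement) =====
-- stated objective: faster
-- what changed: B builds a value->lines index over all inner dicts in one pass and a per-key counter, replacing A's full rescan of every dict for every duplicate value; headers are accumulated by prepending and bodies by appending instead of re-prefixing the whole message.
import Mathlib
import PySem

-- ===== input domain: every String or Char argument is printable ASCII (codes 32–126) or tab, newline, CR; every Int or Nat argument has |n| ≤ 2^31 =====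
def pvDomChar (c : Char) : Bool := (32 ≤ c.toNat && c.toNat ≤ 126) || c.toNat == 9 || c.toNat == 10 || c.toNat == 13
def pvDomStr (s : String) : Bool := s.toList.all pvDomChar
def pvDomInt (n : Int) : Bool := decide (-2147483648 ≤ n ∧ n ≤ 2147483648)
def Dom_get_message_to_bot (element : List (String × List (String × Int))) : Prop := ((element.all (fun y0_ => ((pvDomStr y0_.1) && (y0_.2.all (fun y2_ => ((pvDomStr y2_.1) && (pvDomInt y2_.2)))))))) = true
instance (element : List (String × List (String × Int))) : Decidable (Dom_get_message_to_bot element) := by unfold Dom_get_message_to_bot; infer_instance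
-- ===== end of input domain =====

-- B replaces A's per-duplicate rescan of the whole structure by a value→lines index built in one pass
-- (plus a per-key counter for duplicate detection); same return value, asymptotically fewer scans.

-- ===== PORT A =====
-- one iteration of A's outer loop (the body of `for key1, value1 in element.items()`)
def getMsgStepA (element : List (String × List (String × Int)))
    (messege : String) (kv : String × List (String × Int)) : String :=
  let mylist := kv.2.map (fun p => p.2)
  let D := (PySem.List.enumerate mylist).foldl
      (fun d p => d.modify p.2 [] (fun x => x ++ [p.1])) PySem.Dict.empty
  let D2 := PySem.Dict.mk (D.items.filter (fun p => p.2.length > 1))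
  let messege := D2.keys.foldl (fun messege i =>
    if i != -1 then
      element.foldl (fun m kv' =>
        kv'.2.foldl (fun m p2 =>
          if p2.2 == i then m ++ p2.1 ++ " " ++ PySem.Int.toStr p2.2 ++ "\n" else m) m) messege
    else messege) messege
  "ПО ССЫЛКЕ- " ++ kv.1 ++ " СЛЕДУЮЩИЕ ПОВТОРЫ:\n" ++ messege

def get_message_to_bot (element : List (String × List (String × Int))) : String :=
  element.foldl (getMsgStepA element) ""

-- ===== PORT B =====
-- one iteration of B's loop over element.items(), carrying (heads, body)
def getMsgStepB (index : PySem.Dict Int String)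
    (hb : String × String) (kv : String × List (String × Int)) : String × String :=
  let vals := kv.2.map (fun p => p.2)
  let counts := vals.foldl (fun d v => d.insert v (d.getD v 0 + 1))
      (PySem.Dict.empty : PySem.Dict Int Int)
  let body := (PySem.List.dedup vals).foldl (fun b v =>
      if counts.getD v 0 > 1 && v != -1 then b ++ index.getD v "" else b) hb.2
  ("ПО ССЫЛКЕ- " ++ kv.1 ++ " СЛЕДУЮЩИЕ ПОВТОРЫ:\n" ++ hb.1, body)

def get_message_to_bot_alt (element : List (String × List (String × Int))) : String :=
  let index := element.foldl (fun d kv =>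
      kv.2.foldl (fun d p =>
        d.insert p.2 (d.getD p.2 "" ++ p.1 ++ " " ++ PySem.Int.toStr p.2 ++ "\n")) d)
    PySem.Dict.empty
  let hb := element.foldl (getMsgStepB index) ("", "")
  hb.1 ++ hb.2

-- ===== PRECONDITION & SPEC =====
def Spec_get_message_to_bot (element : List (String × List (String × Int))) (out : String) : Prop := out = get_message_to_bot_alt element
instance (element : List (String × List (String × Int))) (out : String) : Decidable (Spec_get_message_to_bot element out) := by unfold Spec_get_message_to_bot; infer_instance

-- ===== CLAIM (what is proved, stated in full; the proofs are below) =====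
def Claim_equal_get_message_to_bot : Prop := ∀ (element : List (String × List (String × Int))), Dom_get_message_to_bot element → Spec_get_message_to_bot element (get_message_to_bot element)

-- ===== LEMMAS AND PROOFS =====

-- "key value\n" line for one inner item
def pvLine (p : String × Int) : String := p.1 ++ " " ++ PySem.Int.toStr p.2 ++ "\n"

def pvJoin (l : List String) : String := l.foldl (fun a b => a ++ b) ""

-- all lines of items whose value equals i, in element order
def pvScan (element : List (String × List (String × Int))) (i : Int) : String :=
  pvJoin (((element.flatMap (fun kv => kv.2)).filter (fun p => p.2 == i)).map pvLine)

-- values occurring more than once in vs, in first-occurrence order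
def pvDups (vs : List Int) : List Int :=
  (PySem.List.dedup vs).filter (fun v => vs.count v > 1)

def pvBody (element : List (String × List (String × Int))) (vs : List Int) : String :=
  pvJoin (((pvDups vs).filter (fun v => v != -1)).map (pvScan element))

def pvHead (k : String) : String := "ПО ССЫЛКЕ- " ++ k ++ " СЛЕДУЮЩИЕ ПОВТОРЫ:\n"

def pvRH (l : List (String × List (String × Int))) : String :=
  pvJoin ((l.map (fun kv => pvHead kv.1)).reverse)

def pvBD (element l : List (String × List (String × Int))) : String :=
  pvJoin (l.map (fun kv => pvBody element (kv.2.map (fun p => p.2))))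

theorem pv_foldl_append (l : List String) : ∀ s : String,
    l.foldl (fun a b => a ++ b) s = s ++ pvJoin l := by
  induction l with
  | nil => intro s; simp [pvJoin, String.append_empty]
  | cons a l ih =>
    intro s
    rw [List.foldl_cons, ih]
    have h2 : pvJoin (a :: l) = ("" ++ a) ++ pvJoin l := ih ("" ++ a)
    rw [h2, String.empty_append, String.append_assoc]

theorem pvJoin_cons (a : String) (l : List String) : pvJoin (a :: l) = a ++ pvJoin l := by
  simp only [pvJoin, List.foldl_cons, String.empty_append]
  exact pv_foldl_append l a

-- appending loop with a boolean guard equals append of joined mapped filter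
theorem pv_foldl_if_append {α : Type} (p : α → Bool) (g : α → String) (l : List α) : ∀ s : String,
    l.foldl (fun b v => if p v then b ++ g v else b) s
      = s ++ pvJoin ((l.filter p).map g) := by
  induction l with
  | nil => intro s; simp [pvJoin, String.append_empty]
  | cons a l ih =>
    intro s
    by_cases h : p a = true
    · simp only [List.foldl_cons, h, if_true, ih, List.filter_cons, List.map_cons,
        pvJoin_cons, String.append_assoc]
    · simp only [List.foldl_cons, h, List.filter_cons]
      simp only [Bool.not_eq_true] at h
      simp [ih]

-- A's triple scan for a fixed value i, starting from any accumulator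
theorem pvJoin_append (l1 l2 : List String) : pvJoin (l1 ++ l2) = pvJoin l1 ++ pvJoin l2 := by
  have h : pvJoin (l1 ++ l2) = l2.foldl (fun a b => a ++ b) (pvJoin l1) := by
    simp only [pvJoin, List.foldl_append]
  rw [h, pv_foldl_append]

theorem pv_scan_aux (i : Int) (L : List (String × Int)) : ∀ m : String,
    L.foldl (fun m p2 =>
        if p2.2 == i then m ++ p2.1 ++ " " ++ PySem.Int.toStr p2.2 ++ "\n" else m) m
      = m ++ pvJoin ((L.filter (fun p => p.2 == i)).map pvLine) := by
  induction L with
  | nil => intro m; simp [pvJoin, String.append_empty]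
  | cons p L ih =>
    intro m
    rw [List.foldl_cons]
    by_cases h : p.2 = i
    · rw [if_pos (by simp [h]), ih]
      have hfil : ((p :: L).filter (fun q => q.2 == i)) = p :: L.filter (fun q => q.2 == i) := by
        simp [h]
      rw [hfil, List.map_cons, pvJoin_cons]
      simp [pvLine, String.append_assoc]
    · rw [if_neg (by simp [h]), ih]
      have hfil : ((p :: L).filter (fun q => q.2 == i)) = L.filter (fun q => q.2 == i) := by
        simp [h]
      rw [hfil]

theorem pv_scanA (element : List (String × List (String × Int))) (i : Int) : ∀ m : String,
    element.foldl (fun m kv' =>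
        kv'.2.foldl (fun m p2 =>
          if p2.2 == i then m ++ p2.1 ++ " " ++ PySem.Int.toStr p2.2 ++ "\n" else m) m) m
      = m ++ pvScan element i := by
  intro m
  rw [← List.foldl_flatMap]
  exact pv_scan_aux i _ m

theorem pv_idx_aux (i : Int) (L : List (String × Int)) : ∀ d : PySem.Dict Int String,
    (L.foldl (fun d p =>
        d.insert p.2 (d.getD p.2 "" ++ p.1 ++ " " ++ PySem.Int.toStr p.2 ++ "\n")) d).getD i ""
      = d.getD i "" ++ pvJoin ((L.filter (fun p => p.2 == i)).map pvLine) := by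
  induction L with
  | nil => intro d; simp [pvJoin, String.append_empty]
  | cons p L ih =>
    intro d
    rw [List.foldl_cons]
    by_cases h : p.2 = i
    · subst h
      rw [ih, PySem.Dict.getD_insert_self]
      have hfil : ((p :: L).filter (fun q => q.2 == p.2)) = p :: L.filter (fun q => q.2 == p.2) := by
        simp
      rw [hfil, List.map_cons, pvJoin_cons]
      simp [pvLine, String.append_assoc]
    · rw [ih, PySem.Dict.getD_insert_of_ne _ _ _ (Ne.symm h)]
      have hfil : ((p :: L).filter (fun q => q.2 == i)) = L.filter (fun q => q.2 == i) := by
        simp [h]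
      rw [hfil]

-- B's index lookup equals A's scan
theorem pv_index_getD (element : List (String × List (String × Int))) (i : Int) :
    (element.foldl (fun d kv =>
        kv.2.foldl (fun d p =>
          d.insert p.2 (d.getD p.2 "" ++ p.1 ++ " " ++ PySem.Int.toStr p.2 ++ "\n")) d)
      PySem.Dict.empty).getD i "" = pvScan element i := by
  rw [← List.foldl_flatMap]
  rw [pv_idx_aux]
  simp [PySem.Dict.getD_empty, String.empty_append, pvScan]

-- A's filtered duplicate dict has exactly pvDups as keys
theorem pv_dups_keys (vs : List Int) :
    (PySem.Dict.mk ((((PySem.List.enumerate vs).foldl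
        (fun d p => d.modify p.2 [] (fun x => x ++ [p.1])) PySem.Dict.empty)).items.filter
          (fun p => p.2.length > 1))).keys = pvDups vs := by
  have h1 : (((PySem.List.enumerate vs).foldl
      (fun d p => d.modify p.2 [] (fun x => x ++ [p.1])) PySem.Dict.empty)).keys
      = PySem.List.dedup vs := by
    have h := PySem.Dict.keys_foldl_modify_key (PySem.List.enumerate vs)
      (fun p : Int × Int => p.2) ([] : List Int) (fun _ p x => x ++ [p.1]) PySem.Dict.empty
    rw [h, PySem.Dict.keys_empty, PySem.List.map_snd_enumerate]
    rfl
  have hswap : (((PySem.List.enumerate vs).foldl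
      (fun d p => d.modify p.2 [] (fun x => x ++ [p.1])) PySem.Dict.empty))
      = ((PySem.List.enumerate vs).map Prod.swap).foldl
          (fun d q => d.modify q.1 [] (fun x => x ++ [q.2])) PySem.Dict.empty := by
    rw [List.foldl_map]; rfl
  have hlen : ∀ k : Int, ((((PySem.List.enumerate vs).foldl
      (fun d p => d.modify p.2 [] (fun x => x ++ [p.1])) PySem.Dict.empty)).getD k []).length
      = vs.count k := by
    intro k
    rw [hswap, PySem.Dict.getD_foldl_modify_append]
    simp only [PySem.Dict.getD_empty, List.nil_append, List.length_map,
      ← List.countP_eq_length_filter, List.countP_map]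
    conv_rhs => rw [← PySem.List.map_snd_enumerate vs 0, List.count, List.countP_map]
    rfl
  have hnd : (((PySem.List.enumerate vs).foldl
      (fun d p => d.modify p.2 [] (fun x => x ++ [p.1])) PySem.Dict.empty)).keys.Nodup := by
    rw [h1]; exact PySem.List.nodup_dedup vs
  rw [PySem.Dict.keys_mk,
    PySem.Dict.items_eq_map_keys _ hnd ([] : List Int), List.filter_map, List.map_map]
  have hcongr : ∀ l : List Int,
      l.filter ((fun p : Int × List Int => decide (p.2.length > 1)) ∘
        (fun k => (k, (((PySem.List.enumerate vs).foldl
          (fun d p => d.modify p.2 [] (fun x => x ++ [p.1])) PySem.Dict.empty)).getD k [])))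
      = l.filter (fun v => decide (vs.count v > 1)) := by
    intro l
    apply List.filter_congr
    intro x _
    simp [hlen x]
  rw [h1, hcongr]
  simp only [Function.comp_def]
  simp [pvDups]

theorem pvRH_cons (kv : String × List (String × Int)) (l : List (String × List (String × Int))) :
    pvRH (kv :: l) = pvRH l ++ pvHead kv.1 := by
  simp only [pvRH, List.map_cons, List.reverse_cons, pvJoin_append, pvJoin_cons]
  simp [pvJoin, String.append_empty]

theorem pvBD_cons (element : List (String × List (String × Int)))
    (kv : String × List (String × Int)) (l : List (String × List (String × Int))) :
    pvBD element (kv :: l) = pvBody element (kv.2.map (fun p => p.2)) ++ pvBD element l := by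
  simp only [pvBD, List.map_cons, pvJoin_cons]

theorem pv_A_step (element : List (String × List (String × Int)))
    (m : String) (kv : String × List (String × Int)) :
    getMsgStepA element m kv
      = pvHead kv.1 ++ (m ++ pvBody element (kv.2.map (fun p => p.2))) := by
  unfold getMsgStepA
  dsimp only
  rw [pv_dups_keys]
  simp only [pv_scanA]
  rw [pv_foldl_if_append]
  rfl

theorem pv_A_fold (element : List (String × List (String × Int))) :
    ∀ (l : List (String × List (String × Int))) (m : String),
      l.foldl (getMsgStepA element) m = pvRH l ++ (m ++ pvBD element l) := by
  intro l
  induction l with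
  | nil => intro m; simp [pvRH, pvBD, pvJoin, String.append_empty, String.empty_append]
  | cons kv l ih =>
    intro m
    rw [List.foldl_cons, pv_A_step, ih, pvRH_cons, pvBD_cons]
    simp [String.append_assoc]

theorem pv_B_step (element : List (String × List (String × Int)))
    (index : PySem.Dict Int String)
    (hidx : ∀ v : Int, index.getD v "" = pvScan element v)
    (hb : String × String) (kv : String × List (String × Int)) :
    getMsgStepB index hb kv
      = ("ПО ССЫЛКЕ- " ++ kv.1 ++ " СЛЕДУЮЩИЕ ПОВТОРЫ:\n" ++ hb.1,
         hb.2 ++ pvBody element (kv.2.map (fun p => p.2))) := by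
  unfold getMsgStepB
  dsimp only
  simp only [PySem.Dict.foldl_insert_getD_add_one_eq_counter, PySem.Dict.getD_counter, hidx]
  rw [pv_foldl_if_append]
  have hfil : ((PySem.List.dedup (kv.2.map (fun p => p.2))).filter
        (fun v => decide (((kv.2.map (fun p => p.2)).count v : Int) > 1) && (v != -1)))
      = ((pvDups (kv.2.map (fun p => p.2))).filter (fun v => v != -1)) := by
    rw [pvDups, List.filter_filter]
    apply List.filter_congr
    intro x _
    have hcast : ((1 : Int) < ((kv.2.map (fun p => p.2)).count x : Int))
        ↔ (1 < (kv.2.map (fun p => p.2)).count x) := by exact_mod_cast Iff.rfl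
    simp [Bool.and_comm, hcast]
  rw [hfil]
  rfl

theorem pv_B_fold (element : List (String × List (String × Int)))
    (index : PySem.Dict Int String)
    (hidx : ∀ v : Int, index.getD v "" = pvScan element v) :
    ∀ (l : List (String × List (String × Int))) (h b : String),
      l.foldl (getMsgStepB index) (h, b) = (pvRH l ++ h, b ++ pvBD element l) := by
  intro l
  induction l with
  | nil => intro h b; simp [pvRH, pvBD, pvJoin, String.append_empty, String.empty_append]
  | cons kv l ih =>
    intro h b
    rw [List.foldl_cons, pv_B_step element index hidx, ih, pvRH_cons, pvBD_cons]
    simp [pvHead, String.append_assoc]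

-- ===== VERDICT (by name: the statement is the Claim_ definition above) =====
theorem get_message_to_bot_spec : Claim_equal_get_message_to_bot := by
  intro element _
  unfold Spec_get_message_to_bot get_message_to_bot get_message_to_bot_alt
  dsimp only
  rw [pv_A_fold element element "", pv_B_fold element _ (pv_index_getD element) element "" ""]
  simp [String.append_empty, String.empty_append]
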